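-- pv_equiv track=rewrite | github.com/stvsever/PAPER_HFR_TokenSHAP | utils/ig_attribution.py | feature_token_indices_from_offsets
-- ===== SOURCE A (Python) =====
-- from typing import Dict, List, Tuple, Optional, Callable, Any
--
-- def feature_token_indices_from_offsets(
--     offsets: List[Tuple[int, int]],
--     feature_spans: Dict[str, Tuple[int, int]],
-- ) -> Dict[str, List[int]]:
--     feat_to_tokens: Dict[str, List[int]] = {fid: [] for fid in feature_spans.keys()}
--     for ti, (ts, te) in enumerate(offsets):
--         if te <= ts:
--             continue
--         for fid, (fs, fe) in feature_spans.items():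
--             if te > fs and ts < fe:
--                 feat_to_tokens[fid].append(ti)
--     return feat_to_tokens
-- ===== SOURCE B (Python) =====
-- def feature_token_indices_from_offsets(offsets, feature_spans):
--     # Sort the non-empty tokens by start once; per feature, scan only the
--     # prefix of tokens starting before the feature's end (break on ts >= fe),
--     # then sort the collected indices back into token order.
--     toks = sorted(((ts, te, ti) for ti, (ts, te) in enumerate(offsets) if ts < te),
--                   key=lambda t: t[0])
--     out = {}
--     for fid, (fs, fe) in feature_spans.items():
--         idxs = []
--         for ts, te, ti in toks:
--             if ts >= fe:
--                 break
--             if fs < te: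
--                 idxs.append(ti)
--         out[fid] = sorted(idxs)
--     return out
-- ===== Notes on version B (the rewrite author's own statement) =====
-- stated objective: alternative
-- what changed: B replaces A's token-major nested scan with mutated per-feature accumulators by a sort-then-prune pass: it sorts the non-empty tokens by start once, per feature scans only the prefix of tokens starting before the feature's end (break on ts >= fe), and sorts the collected indices back into token order.
import Mathlib
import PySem

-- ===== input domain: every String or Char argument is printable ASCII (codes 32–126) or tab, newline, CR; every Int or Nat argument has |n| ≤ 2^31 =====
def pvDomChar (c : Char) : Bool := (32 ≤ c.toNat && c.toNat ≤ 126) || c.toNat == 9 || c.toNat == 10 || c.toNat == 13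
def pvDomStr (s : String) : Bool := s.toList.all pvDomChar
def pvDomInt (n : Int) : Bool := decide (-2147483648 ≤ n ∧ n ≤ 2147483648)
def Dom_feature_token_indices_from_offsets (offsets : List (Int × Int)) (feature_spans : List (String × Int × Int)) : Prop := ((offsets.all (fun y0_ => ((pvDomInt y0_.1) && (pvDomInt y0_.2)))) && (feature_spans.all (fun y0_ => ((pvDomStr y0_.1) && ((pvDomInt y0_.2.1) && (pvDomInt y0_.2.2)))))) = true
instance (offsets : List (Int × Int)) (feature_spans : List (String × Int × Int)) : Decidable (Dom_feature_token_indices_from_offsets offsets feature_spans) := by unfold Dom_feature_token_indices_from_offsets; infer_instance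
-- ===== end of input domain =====

-- B sorts the non-empty tokens by start once and, per feature, scans only the prefix of tokens
-- starting before the feature's end (sort + prefix pruning instead of A's full nested scan).


-- ===== PORT A =====
-- token-major double loop mutating a dict of per-feature accumulator lists (literal port of A)
def feature_token_indices_from_offsets (offsets : List (Int × Int)) (feature_spans : List (String × Int × Int)) : List (String × List Int) :=
  let d0 : PySem.Dict String (Int × Int) := PySem.Dict.ofList feature_spans
  let init : PySem.Dict String (List Int) :=
    d0.keys.foldl (fun m fid => m.insert fid []) PySem.Dict.empty
  let final : PySem.Dict String (List Int) :=
    (PySem.List.enumerate offsets).foldl (fun m p =>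
      if p.2.2 ≤ p.2.1 then m
      else d0.items.foldl (fun m' q =>
        if p.2.2 > q.2.1 ∧ p.2.1 < q.2.2 then m'.modify q.1 [] (fun l => l ++ [p.1]) else m') m) init
  final.items

-- ===== PORT B =====
-- sort non-empty tokens by start once; per feature scan the prefix of tokens with ts < fe
-- (the loop's 'break' = takeWhile), keep those with fs < te, sort the indices (port of Source B)
def feature_token_indices_from_offsets_alt (offsets : List (Int × Int)) (feature_spans : List (String × Int × Int)) : List (String × List Int) :=
  let toks : List (Int × Int × Int) :=
    PySem.List.sorted ((PySem.List.enumerate offsets).filterMap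
      (fun p => if p.2.1 < p.2.2 then some (p.2.1, p.2.2, p.1) else none)) (fun t => t.1) false
  (PySem.Dict.ofList feature_spans).items.map (fun q =>
    (q.1, PySem.List.sorted
            (((toks.takeWhile (fun t => decide (t.1 < q.2.2))).filter
               (fun t => decide (q.2.1 < t.2.1))).map (fun t => t.2.2))
            (fun x => x) false))

-- ===== PRECONDITION & SPEC =====
def Spec_feature_token_indices_from_offsets (offsets : List (Int × Int)) (feature_spans : List (String × Int × Int)) (out : List (String × List Int)) : Prop := out = feature_token_indices_from_offsets_alt offsets feature_spans
instance (offsets : List (Int × Int)) (feature_spans : List (String × Int × Int)) (out : List (String × List Int)) : Decidable (Spec_feature_token_indices_from_offsets offsets feature_spans out) := by unfold Spec_feature_token_indices_from_offsets; infer_instance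

-- ===== CLAIM (what is proved, stated in full; the proofs are below) =====
def Claim_equal_feature_token_indices_from_offsets : Prop := ∀ (offsets : List (Int × Int)) (feature_spans : List (String × Int × Int)), Dom_feature_token_indices_from_offsets offsets feature_spans → Spec_feature_token_indices_from_offsets offsets feature_spans (feature_token_indices_from_offsets offsets feature_spans)

-- ===== LEMMAS AND PROOFS =====

-- keys are unchanged by A's inner loop when every feature id is already a key
theorem pv_inner_keys (ts te ti : Int) (l : List (String × Int × Int)) (m : PySem.Dict String (List Int))
    (hk : ∀ q ∈ l, q.1 ∈ m.keys) :
    (l.foldl (fun m' q => if te > q.2.1 ∧ ts < q.2.2 then m'.modify q.1 [] (fun v => v ++ [ti]) else m') m).keys = m.keys := by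
  induction l generalizing m with
  | nil => rfl
  | cons q l ih =>
    simp only [List.foldl_cons]
    by_cases h : te > q.2.1 ∧ ts < q.2.2
    · rw [if_pos h]
      have hkeys : (m.modify q.1 [] (fun v => v ++ [ti])).keys = m.keys := by
        rw [PySem.Dict.keys_modify,
            PySem.Dict.keys_insert_of_contains _ _ ((PySem.Dict.contains_iff_mem_keys m q.1).mpr (hk q (List.mem_cons_self)))]
      rw [ih _ (fun q' hq' => hkeys ▸ hk q' (List.mem_cons_of_mem _ hq')), hkeys]
    · rw [if_neg h]
      exact ih m (fun q' hq' => hk q' (List.mem_cons_of_mem _ hq'))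

theorem pv_inner_getD_notmem (ts te ti : Int) (fid : String)
    (l : List (String × Int × Int)) (m : PySem.Dict String (List Int))
    (hnm : fid ∉ l.map (fun q => q.1)) :
    (l.foldl (fun m' q => if te > q.2.1 ∧ ts < q.2.2 then m'.modify q.1 [] (fun v => v ++ [ti]) else m') m).getD fid [] = m.getD fid [] := by
  induction l generalizing m with
  | nil => rfl
  | cons q l ih =>
    simp only [List.map_cons, List.mem_cons, not_or] at hnm
    simp only [List.foldl_cons]
    rw [ih _ hnm.2]
    by_cases h : te > q.2.1 ∧ ts < q.2.2
    · rw [if_pos h, PySem.Dict.getD_modify_of_ne _ _ _ hnm.1]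
    · rw [if_neg h]

theorem pv_inner_getD_mem (ts te ti fs fe : Int) (fid : String)
    (l : List (String × Int × Int)) (m : PySem.Dict String (List Int))
    (hnd : (l.map (fun q => q.1)).Nodup) (hmem : (fid, fs, fe) ∈ l) :
    (l.foldl (fun m' q => if te > q.2.1 ∧ ts < q.2.2 then m'.modify q.1 [] (fun v => v ++ [ti]) else m') m).getD fid [] =
      m.getD fid [] ++ (if te > fs ∧ ts < fe then [ti] else []) := by
  induction l generalizing m with
  | nil => cases hmem
  | cons q l ih =>
    simp only [List.map_cons, List.nodup_cons] at hnd
    simp only [List.foldl_cons]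
    rcases List.mem_cons.mp hmem with h | h
    · subst h
      by_cases hc : te > fs ∧ ts < fe
      · rw [if_pos hc, pv_inner_getD_notmem _ _ _ _ _ _ hnd.1, PySem.Dict.getD_modify_self, if_pos hc]
      · rw [if_neg hc, pv_inner_getD_notmem _ _ _ _ _ _ hnd.1, if_neg hc, List.append_nil]
    · have hne : q.1 ≠ fid := fun he => hnd.1 (he ▸ (List.mem_map.mpr ⟨(fid, fs, fe), h, rfl⟩))
      by_cases hc : te > q.2.1 ∧ ts < q.2.2
      · rw [if_pos hc, ih _ hnd.2 h, PySem.Dict.getD_modify_of_ne _ _ _ (Ne.symm hne)]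
      · rw [if_neg hc, ih _ hnd.2 h]

theorem pv_outer_keys (d0items : List (String × Int × Int)) (toks : List (Int × Int × Int)) (m : PySem.Dict String (List Int))
    (hk : ∀ q ∈ d0items, q.1 ∈ m.keys) :
    (toks.foldl (fun m p =>
      if p.2.2 ≤ p.2.1 then m
      else d0items.foldl (fun m' q =>
        if p.2.2 > q.2.1 ∧ p.2.1 < q.2.2 then m'.modify q.1 [] (fun v => v ++ [p.1]) else m') m) m).keys = m.keys := by
  induction toks generalizing m with
  | nil => rfl
  | cons p toks ih =>
    simp only [List.foldl_cons]
    by_cases h : p.2.2 ≤ p.2.1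
    · rw [if_pos h]; exact ih m hk
    · rw [if_neg h]
      have hkeys := pv_inner_keys p.2.1 p.2.2 p.1 d0items m hk
      rw [ih _ (fun q' hq' => hkeys ▸ hk q' hq'), hkeys]

theorem pv_outer_getD (d0items : List (String × Int × Int)) (fid : String) (fs fe : Int)
    (hnd : (d0items.map (fun q => q.1)).Nodup) (hmem : (fid, fs, fe) ∈ d0items)
    (toks : List (Int × Int × Int)) (m : PySem.Dict String (List Int)) :
    (toks.foldl (fun m p =>
      if p.2.2 ≤ p.2.1 then m
      else d0items.foldl (fun m' q =>
        if p.2.2 > q.2.1 ∧ p.2.1 < q.2.2 then m'.modify q.1 [] (fun v => v ++ [p.1]) else m') m) m).getD fid [] =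
      m.getD fid [] ++ ((toks.filter (fun p => decide (p.2.1 < p.2.2 ∧ fs < p.2.2 ∧ p.2.1 < fe))).map (fun p => p.1)) := by
  induction toks generalizing m with
  | nil => simp
  | cons p toks ih =>
    simp only [List.foldl_cons, List.filter_cons]
    by_cases h : p.2.2 ≤ p.2.1
    · have hcnd : decide (p.2.1 < p.2.2 ∧ fs < p.2.2 ∧ p.2.1 < fe) = false := by
        simp only [decide_eq_false_iff_not]; omega
      rw [if_pos h, hcnd]
      simpa using ih m
    · rw [if_neg h, ih, pv_inner_getD_mem p.2.1 p.2.2 p.1 fs fe fid d0items _ hnd hmem]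
      by_cases hc : p.2.2 > fs ∧ p.2.1 < fe
      · have hcnd : decide (p.2.1 < p.2.2 ∧ fs < p.2.2 ∧ p.2.1 < fe) = true := by
          simp only [decide_eq_true_eq]; omega
        rw [if_pos hc, hcnd, if_pos rfl, List.map_cons, List.append_assoc]
        rfl
      · have hcnd : decide (p.2.1 < p.2.2 ∧ fs < p.2.2 ∧ p.2.1 < fe) = false := by
          simp only [decide_eq_false_iff_not]; omega
        rw [if_neg hc, hcnd, List.append_nil]
        simp

theorem pv_init_getD (fid : String) (ks : List String) (m0 : PySem.Dict String (List Int))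
    (h : ∀ k, m0.getD k ([] : List Int) = []) :
    (ks.foldl (fun m fid' => m.insert fid' []) m0).getD fid [] = [] := by
  induction ks generalizing m0 with
  | nil => exact h fid
  | cons k ks ih =>
    simp only [List.foldl_cons]
    refine ih _ (fun k' => ?_)
    rw [PySem.Dict.getD_insert]
    split_ifs with hk
    · rfl
    · exact h k'

theorem pv_init_keys (ks : List String) :
    (ks.foldl (fun m fid' => m.insert fid' ([] : List Int)) PySem.Dict.empty).keys = PySem.Set.ofList ks := by
  rw [PySem.Dict.keys_foldl_insert]
  rfl

-- on a list whose key values are nondecreasing, the break (takeWhile) sees exactly the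
-- elements a full filter would keep
theorem pv_takeWhile_eq_filter {α : Type} (key : α → Int) (c : Int) (l : List α)
    (hs : l.Pairwise (fun a b => key a ≤ key b)) :
    l.takeWhile (fun a => decide (key a < c)) = l.filter (fun a => decide (key a < c)) := by
  induction l with
  | nil => rfl
  | cons a l ih =>
    rw [List.pairwise_cons] at hs
    by_cases h : key a < c
    · simp [h, ih hs.2]
    · have h0 : decide (key a < c) = false := by simpa using h
      simp only [List.takeWhile_cons, List.filter_cons, h0, Bool.false_eq_true, if_false]
      exact (List.filter_eq_nil_iff.mpr
        (fun b hb hlt => h (lt_of_le_of_lt (hs.1 b hb) (by simpa using hlt)))).symm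

-- B's per-feature pipeline over the raw (unsorted) valid-token triples yields A's filter
theorem pv_pipeline_raw (offsets : List (Int × Int)) (fs fe : Int) :
    ((((PySem.List.enumerate offsets).filterMap
        (fun p => if p.2.1 < p.2.2 then some (p.2.1, p.2.2, p.1) else none)).filter
        (fun t => decide (fs < t.2.1) && decide (t.1 < fe))).map (fun t => t.2.2)) =
      ((PySem.List.enumerate offsets).filter
        (fun p => decide (p.2.1 < p.2.2 ∧ fs < p.2.2 ∧ p.2.1 < fe))).map (fun p => p.1) := by
  induction PySem.List.enumerate offsets with
  | nil => rfl
  | cons p l ih =>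
    simp only [List.filterMap_cons, List.filter_cons]
    by_cases h1 : p.2.1 < p.2.2
    · rw [if_pos h1]
      simp only [List.filter_cons]
      by_cases h2 : fs < p.2.2 ∧ p.2.1 < fe
      · have : (decide (fs < p.2.2) && decide (p.2.1 < fe)) = true := by
          simp only [Bool.and_eq_true, decide_eq_true_eq]; exact ⟨h2.1, h2.2⟩
        rw [this, if_pos rfl]
        have : decide (p.2.1 < p.2.2 ∧ fs < p.2.2 ∧ p.2.1 < fe) = true := by
          simp only [decide_eq_true_eq]; exact ⟨h1, h2⟩
        rw [this, if_pos rfl, List.map_cons, List.map_cons, ih]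
      · have hb : (decide (fs < p.2.2) && decide (p.2.1 < fe)) = false := by
          simp only [Bool.and_eq_false_iff, decide_eq_false_iff_not]; tauto
        have hc : decide (p.2.1 < p.2.2 ∧ fs < p.2.2 ∧ p.2.1 < fe) = false := by
          simp only [decide_eq_false_iff_not]; tauto
        rw [hb, hc]
        simpa using ih
    · rw [if_neg h1]
      have hc : decide (p.2.1 < p.2.2 ∧ fs < p.2.2 ∧ p.2.1 < fe) = false := by
        simp only [decide_eq_false_iff_not]; tauto
      rw [hc]
      simpa using ih

-- A's per-feature index list is strictly increasing
theorem pv_filter_pairwise_lt (offsets : List (Int × Int)) (fs fe : Int) :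
    (((PySem.List.enumerate offsets).filter
        (fun p => decide (p.2.1 < p.2.2 ∧ fs < p.2.2 ∧ p.2.1 < fe))).map (fun p => p.1)).Pairwise (· < ·) :=
  ((PySem.List.pairwise_lt_enumerate offsets 0).filter _).map _ (fun _ _ h => h)

-- B's per-feature value equals A's per-feature index list
theorem pv_bside (offsets : List (Int × Int)) (fs fe : Int) :
    PySem.List.sorted
        ((((PySem.List.sorted ((PySem.List.enumerate offsets).filterMap
              (fun p => if p.2.1 < p.2.2 then some (p.2.1, p.2.2, p.1) else none)) (fun t => t.1) false).takeWhile
              (fun t => decide (t.1 < fe))).filter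
              (fun t => decide (fs < t.2.1))).map (fun t => t.2.2))
        (fun x => x) false =
      ((PySem.List.enumerate offsets).filter
        (fun p => decide (p.2.1 < p.2.2 ∧ fs < p.2.2 ∧ p.2.1 < fe))).map (fun p => p.1) := by
  set raw := (PySem.List.enumerate offsets).filterMap
      (fun p => if p.2.1 < p.2.2 then some (p.2.1, p.2.2, p.1) else none) with hraw
  set toks := PySem.List.sorted raw (fun t => t.1) false with htoks
  have hperm : toks.Perm raw := PySem.List.sorted_perm raw _ _
  rw [pv_takeWhile_eq_filter (fun t => t.1) fe toks (PySem.List.sorted_pairwise raw (fun t : Int × Int × Int => t.1)),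
      List.filter_filter]
  refine PySem.List.sorted_eq_of_perm_of_pairwise_lt _ _ (fun x : Int => x) ?_ ?_
  · rw [← pv_pipeline_raw offsets fs fe]
    exact ((hperm.filter _).map _).symm
  · exact pv_filter_pairwise_lt offsets fs fe

-- ===== VERDICT (by name: the statement is the Claim_ definition above) =====
theorem feature_token_indices_from_offsets_spec : Claim_equal_feature_token_indices_from_offsets := by
  intro offsets feature_spans _
  unfold Spec_feature_token_indices_from_offsets
  unfold feature_token_indices_from_offsets feature_token_indices_from_offsets_alt
  simp only
  set d0 : PySem.Dict String (Int × Int) := PySem.Dict.ofList feature_spans with hd0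
  have hknd : d0.keys.Nodup := PySem.Dict.nodup_keys_ofList feature_spans
  set init : PySem.Dict String (List Int) :=
    d0.keys.foldl (fun m fid => m.insert fid []) PySem.Dict.empty with hinit
  set final : PySem.Dict String (List Int) :=
    (PySem.List.enumerate offsets).foldl (fun m p =>
      if p.2.2 ≤ p.2.1 then m
      else d0.items.foldl (fun m' q =>
        if p.2.2 > q.2.1 ∧ p.2.1 < q.2.2 then m'.modify q.1 [] (fun l => l ++ [p.1]) else m') m) init with hfinal
  have hkinit : init.keys = d0.keys := by
    rw [hinit, pv_init_keys, PySem.Set.ofList_eq_self_of_nodup _ hknd]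
  have hkfinal : final.keys = d0.keys := by
    rw [hfinal, pv_outer_keys _ _ _ (fun q hq => hkinit ▸ PySem.Dict.mem_keys_of_mem_items d0 hq), hkinit]
  have hfnd : final.keys.Nodup := hkfinal ▸ hknd
  have hitemsnd : (d0.items.map (fun q => q.1)).Nodup := hknd
  rw [PySem.Dict.items_eq_map_keys final hfnd [], hkfinal,
      PySem.Dict.items_eq_map_keys d0 hknd ((0 : Int), (0 : Int)), List.map_map]
  refine List.map_congr_left (fun k hk => ?_)
  obtain ⟨v, hv⟩ : ∃ v, d0.get? k = some v := by
    rcases h : d0.get? k with _ | v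
    · exact absurd ((PySem.Dict.get?_eq_none_iff_not_mem_keys d0 k).mp h) (not_not.mpr hk)
    · exact ⟨v, rfl⟩
  have hmem : (k, v) ∈ d0.items := PySem.Dict.mem_items_of_get?_eq_some d0 hv
  have hgd : d0.getD k ((0 : Int), (0 : Int)) = v := PySem.Dict.getD_of_get?_eq_some d0 _ hv
  have hinit0 : init.getD k [] = [] := by
    rw [hinit]
    exact pv_init_getD k d0.keys PySem.Dict.empty (fun k' => PySem.Dict.getD_empty k' [])
  have hmain := pv_outer_getD d0.items k v.1 v.2 hitemsnd (by simpa using hmem) (PySem.List.enumerate offsets) init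
  simp only [Function.comp]
  rw [hfinal, hmain, hinit0, List.nil_append]
  simp only [hgd]
  rw [pv_bside offsets v.1 v.2]
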